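-- pv_equiv track=rewrite | github.com/gurpr337/sec-project | backend/app/services/sec_extractor.py | _has_date_pattern
-- ===== SOURCE A (Python) =====
-- def _has_date_pattern(text: str) -> bool:
--     """Check if text contains date-related patterns"""
--     if not text:
--         return False
--
--     text_lower = text.lower()
--     # Common date patterns in SEC tables
--     date_indicators = [
--         'ended', 'months', 'endedjune', 'endeddecember', 'endedmarch',
--         'january', 'february', 'march', 'april', 'may', 'june',
--         'july', 'august', 'september', 'october', 'november', 'december',
--         '2025', '2024', '2023', '2022', '2021', '2020'
--     ]
--
--     return any(indicator in text_lower for indicator in date_indicators)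
-- ===== SOURCE B (Python) =====
-- _DATE_INDICATORS = [
--     'ended', 'months', 'endedjune', 'endeddecember', 'endedmarch',
--     'january', 'february', 'march', 'april', 'may', 'june',
--     'july', 'august', 'september', 'october', 'november', 'december',
--     '2025', '2024', '2023', '2022', '2021', '2020'
-- ]
--
-- # Dispatch table: indicators grouped by their first character, built once.
-- _BY_FIRST = {}
-- for _ind in _DATE_INDICATORS:
--     _BY_FIRST.setdefault(_ind[0], []).append(_ind)
--
--
-- def _has_date_pattern(text: str) -> bool:
--     """Single left-to-right scan: at each position try only the indicators
--     that start with the current character."""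
--     text_lower = text.lower()
--     for j, c in enumerate(text_lower):
--         for ind in _BY_FIRST.get(c, ()):
--             if text_lower.startswith(ind, j):
--                 return True
--     return False
-- ===== Notes on version B (the rewrite author's own statement) =====
-- stated objective: alternative
-- what changed: A runs 23 independent substring-containment scans over the lowered text; B makes one left-to-right pass over the text, at each position trying only the indicators grouped under the current character in a first-character dispatch table built once.
import Mathlib
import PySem

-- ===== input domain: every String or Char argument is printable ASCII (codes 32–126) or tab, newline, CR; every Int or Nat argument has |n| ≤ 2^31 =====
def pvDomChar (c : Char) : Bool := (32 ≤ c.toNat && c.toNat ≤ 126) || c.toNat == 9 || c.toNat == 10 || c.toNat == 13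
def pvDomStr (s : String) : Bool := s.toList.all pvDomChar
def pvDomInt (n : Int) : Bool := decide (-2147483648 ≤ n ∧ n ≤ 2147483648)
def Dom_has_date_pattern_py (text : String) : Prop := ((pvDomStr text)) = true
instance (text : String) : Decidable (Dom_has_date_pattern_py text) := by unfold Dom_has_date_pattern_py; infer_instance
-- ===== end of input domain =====

-- B replaces A's 23 independent substring scans by one left-to-right scan with a
-- first-character dispatch table (objective: alternative single-pass algorithm).

-- ===== PORT A =====
def pvDateIndicatorsA : List String :=
  ["ended", "months", "endedjune", "endeddecember", "endedmarch",
   "january", "february", "march", "april", "may", "june",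
   "july", "august", "september", "october", "november", "december",
   "2025", "2024", "2023", "2022", "2021", "2020"]

def has_date_pattern_py (text : String) : Bool :=
  if PySem.Str.len text = 0 then false
  else
    let text_lower := PySem.Str.lower text
    pvDateIndicatorsA.any (fun indicator => PySem.Str.isIn indicator text_lower)

-- ===== PORT B =====
def pvDateIndicatorsB : List (List Char) :=
  ["ended".toList, "months".toList, "endedjune".toList, "endeddecember".toList,
   "endedmarch".toList, "january".toList, "february".toList, "march".toList,
   "april".toList, "may".toList, "june".toList, "july".toList, "august".toList,
   "september".toList, "october".toList, "november".toList, "december".toList,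
   "2025".toList, "2024".toList, "2023".toList, "2022".toList, "2021".toList,
   "2020".toList]

-- the _BY_FIRST dispatch table: indicators whose first character is c
def pvByFirst (c : Char) : List (List Char) :=
  pvDateIndicatorsB.filter (fun ind => ind.head? == some c)

-- the scan loop: at each position try only the indicators starting with that char
def pvScan : List Char → Bool
  | [] => false
  | c :: rest =>
      (pvByFirst c).any (fun ind => PySem.Chars.startswith (c :: rest) ind) || pvScan rest

def has_date_pattern_py_alt (text : String) : Bool :=
  pvScan (PySem.Str.lower text).toList

-- ===== PRECONDITION & SPEC =====
def Spec_has_date_pattern_py (text : String) (out : Bool) : Prop := out = has_date_pattern_py_alt text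
instance (text : String) (out : Bool) : Decidable (Spec_has_date_pattern_py text out) := by unfold Spec_has_date_pattern_py; infer_instance

-- ===== CLAIM (what is proved, stated in full; the proofs are below) =====
def Claim_equal_has_date_pattern_py : Prop := ∀ (text : String), Dom_has_date_pattern_py text → Spec_has_date_pattern_py text (has_date_pattern_py text)

-- ===== LEMMAS AND PROOFS =====

lemma pvInds_ne_nil : ∀ ind ∈ pvDateIndicatorsB, ind ≠ [] := by decide

lemma pvIndsA_map : pvDateIndicatorsA.map String.toList = pvDateIndicatorsB := by decide

-- the scan finds exactly the indicators occurring as a prefix of some suffix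
lemma pvScan_iff (cs : List Char) :
    pvScan cs = true ↔ ∃ ind ∈ pvDateIndicatorsB, ∃ j, ind <+: cs.drop j := by
  induction cs with
  | nil =>
      simp only [pvScan, Bool.false_eq_true, false_iff]
      rintro ⟨ind, hmem, j, hpre⟩
      simp only [List.drop_nil, List.prefix_nil] at hpre
      exact pvInds_ne_nil ind hmem hpre
  | cons c rest ih =>
      simp only [pvScan, Bool.or_eq_true, List.any_eq_true, ih]
      constructor
      · rintro (⟨ind, hmem, hsw⟩ | ⟨ind, hmem, j, hpre⟩)
        · rw [pvByFirst, List.mem_filter] at hmem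
          exact ⟨ind, hmem.1, 0, (PySem.Chars.startswith_iff _ _).mp hsw⟩
        · exact ⟨ind, hmem, j + 1, by simpa using hpre⟩
      · rintro ⟨ind, hmem, j, hpre⟩
        cases j with
        | zero =>
            left
            refine ⟨ind, ?_, (PySem.Chars.startswith_iff _ _).mpr (by simpa using hpre)⟩
            rw [pvByFirst, List.mem_filter]
            refine ⟨hmem, ?_⟩
            cases ind with
            | nil => exact absurd rfl (pvInds_ne_nil [] hmem)
            | cons d t =>
                simp only [List.drop_zero] at hpre
                obtain ⟨u, hu⟩ := hpre
                simp_all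
        | succ j =>
            right
            exact ⟨ind, hmem, j, by simpa using hpre⟩

-- ===== VERDICT (by name: the statement is the Claim_ definition above) =====
theorem has_date_pattern_py_spec : Claim_equal_has_date_pattern_py := by
  intro text _
  unfold Spec_has_date_pattern_py has_date_pattern_py has_date_pattern_py_alt
  rw [Bool.eq_iff_iff]
  by_cases h0 : PySem.Str.len text = 0
  · rw [if_pos h0]
    simp only [Bool.false_eq_true, false_iff]
    have hnil : text.toList = [] := by
      simpa [PySem.Str.len_eq] using h0
    intro hscan
    rw [show (PySem.Str.lower text).toList = ([] : List Char) by
          simp [PySem.Str.toList_lower, hnil, PySem.Chars.lower]] at hscan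
    simp [pvScan] at hscan
  · rw [if_neg h0]
    simp only [List.any_eq_true, pvScan_iff, PySem.Str.isIn_eq, PySem.Str.toList_lower]
    constructor
    · rintro ⟨ind, hmem, hin⟩
      obtain ⟨j, hj⟩ := (PySem.Chars.exists_prefix_drop_iff_isIn _ _).mpr hin
      exact ⟨ind.toList, pvIndsA_map ▸ List.mem_map_of_mem hmem, j, hj⟩
    · rintro ⟨ind, hmem, j, hj⟩
      rw [← pvIndsA_map] at hmem
      obtain ⟨s, hs, rfl⟩ := List.mem_map.mp hmem
      exact ⟨s, hs, (PySem.Chars.exists_prefix_drop_iff_isIn _ _).mp ⟨j, hj⟩⟩
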